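-- pv_equiv track=rewrite | github.com/ALItaheri1380/Algorithm | RemovingCommonSubstrings.py | Dp
-- ===== SOURCE A (Python) =====
-- def delete(str , path):
--     str = str[len(path):]
--     return str
--
-- def check(str , path):
--     for i in range(len(path)):
--         if path[i] != str[i]:
--             return False
--     return True
--
-- def Dp(mystr , paths , Dic):
--     if(mystr in Dic):
--         return Dic[mystr]
--
--     if mystr =='':
--         return True
--
--     for i in range(len(paths)):
--
--         if(check(mystr , paths[i])):
--             newStr = delete(mystr , paths[i])
--
--             if Dp(newStr , paths , Dic):
--                 Dic[mystr] = True
--                 return True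
--
--     Dic[mystr] = False
--     return False
-- ===== SOURCE B (Python) =====
-- def Dp(mystr, paths, Dic):
--     # Bottom-up DP over suffix positions (A is a memoised top-down recursion).
--     # Return value only: A also mutates Dic in place; B does not.
--     n = len(mystr)
--     dp = [False] * (n + 1)
--     for i in range(n, -1, -1):
--         suffix = mystr[i:]
--         if suffix in Dic:
--             dp[i] = Dic[suffix]
--         elif i == n:
--             dp[i] = True
--         else:
--             dp[i] = any(mystr[i:i + len(p)] == p and dp[i + len(p)] for p in paths)
--     return dp[0]
-- ===== Notes on version B (the rewrite author's own statement) =====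
-- stated objective: alternative
-- what changed: Replaced A's memoised top-down recursion (which threads and mutates the Dic dictionary) by an iterative bottom-up DP table over suffix positions, filled right-to-left with no recursion and no mutation of Dic; B's return value equals A's but B does not write into Dic.
-- outside the precondition, e.g. on Dp('a', ['a', ''], {}): A returns True, B returns True; on Dp('ab', ['ab', 'abc'], {}): A returns True, B returns True
import Mathlib
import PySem

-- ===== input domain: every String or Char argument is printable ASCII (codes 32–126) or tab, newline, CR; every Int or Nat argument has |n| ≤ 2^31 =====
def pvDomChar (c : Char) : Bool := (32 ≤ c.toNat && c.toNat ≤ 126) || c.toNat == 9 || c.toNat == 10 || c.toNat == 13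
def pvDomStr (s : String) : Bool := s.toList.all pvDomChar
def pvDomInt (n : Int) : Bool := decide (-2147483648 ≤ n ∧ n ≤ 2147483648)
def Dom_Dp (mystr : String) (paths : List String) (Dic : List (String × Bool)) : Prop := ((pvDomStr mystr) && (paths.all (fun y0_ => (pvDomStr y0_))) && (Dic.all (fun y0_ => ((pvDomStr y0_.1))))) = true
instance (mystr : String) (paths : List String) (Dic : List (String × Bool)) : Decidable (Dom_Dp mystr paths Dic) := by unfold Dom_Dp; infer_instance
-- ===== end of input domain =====

-- B replaces A's memoised top-down recursion (which mutates Dic) by an iterative bottom-up DP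
-- table over suffix positions; the equivalence proved is about the RETURN value only (A also
-- writes into Dic in place, B does not).

-- ===== PORT A =====
-- check(str, path): the loop over the indices of path, as structural recursion over path
-- pairing off str. Where Python raises IndexError (str exhausted while path still matches)
-- this returns false; Pre_Dp excludes those inputs.
def checkA : List Char → List Char → Bool
  | _, [] => true
  | [], _ :: _ => false
  | a :: s, c :: p => if c ≠ a then false else checkA s p

-- delete(str, path) = str[len(path):]
def deleteA (s p : List Char) : List Char := PySem.List.slice s (some (p.length : Int)) none

-- the `for i in range(len(paths))` loop of Dp; `rec` is the recursive call Dp(newStr, paths, Dic)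
def DpALoop (rec : List Char → PySem.Dict String Bool → Bool × PySem.Dict String Bool)
    (s : List Char) : List (List Char) → PySem.Dict String Bool → Bool × PySem.Dict String Bool
  | [], d => (false, d)
  | p :: rest, d =>
    if checkA s p then
      match rec (deleteA s p) d with
      | (true, d') => (true, d')
      | (false, d') => DpALoop rec s rest d'
    else DpALoop rec s rest d

-- Dp, threading the mutated dictionary; the fuel (one unit per recursion level) only makes the
-- recursion total in Lean: Python recurses forever only on inputs excluded by Pre_Dp (empty path).
def DpA : Nat → List Char → List (List Char) → PySem.Dict String Bool → Bool × PySem.Dict String Bool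
  | 0, _, _, d => (false, d)
  | fuel + 1, s, ps, d =>
    match PySem.Dict.get? d (String.ofList s) with
    | some v => (v, d)
    | none =>
      if s = [] then (true, d)
      else
        match DpALoop (fun s' d' => DpA fuel s' ps d') s ps d with
        | (true, d') => (true, PySem.Dict.insert d' (String.ofList s) true)
        | (false, d') => (false, PySem.Dict.insert d' (String.ofList s) false)

def Dp (mystr : String) (paths : List String) (Dic : List (String × Bool)) : Bool :=
  (DpA (mystr.toList.length + 1) mystr.toList (paths.map String.toList) (PySem.Dict.ofList Dic)).1

-- ===== PORT B =====
-- dp table filled for i = n, n-1, …, 0; `dpRowB s ps d k` is the list [dp[n+1-k], …, dp[n]]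
-- (the python loop writes dp[i] with i = n - k', building the array back to front).
-- dp[i + len(p)] is rest.getD (len p - 1); under Pre_Dp the index is in range when the slice matches.
def dpRowB (s : List Char) (ps : List (List Char)) (d : PySem.Dict String Bool) : Nat → List Bool
  | 0 => []
  | k + 1 =>
    let rest := dpRowB s ps d k
    let i := s.length - k
    let suffix := PySem.List.slice s (some (i : Int)) none
    let v :=
      match PySem.Dict.get? d (String.ofList suffix) with
      | some b => b
      | none =>
        if k = 0 then true
        else ps.any (fun p =>
          (PySem.List.slice s (some (i : Int)) (some ((i : Int) + (p.length : Int))) == p)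
            && (false :: rest).getD p.length false)
    v :: rest

def Dp_alt (mystr : String) (paths : List String) (Dic : List (String × Bool)) : Bool :=
  (dpRowB mystr.toList (paths.map String.toList) (PySem.Dict.ofList Dic)
    (mystr.toList.length + 1)).headD false

-- ===== PRECONDITION & SPEC =====
-- Pre_ excludes inputs with an empty path that the top-level loop can reach (A recurses forever
-- there) and inputs where some nonempty un-memoised suffix of mystr is a proper prefix of a path
-- (A's check can raise IndexError there); the condition is conservative: on a few such inputs A
-- still returns, when the offending suffix/path pair is never reached (see the cited examples).
def Pre_Dp (mystr : String) (paths : List String) (Dic : List (String × Bool)) : Prop :=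
  ("" ∈ paths → (mystr.toList = [] ∨
      PySem.Dict.get? (PySem.Dict.ofList Dic) (String.ofList mystr.toList) ≠ none)) ∧
  (∀ p ∈ paths, ∀ i ∈ List.range mystr.toList.length,
      PySem.Dict.get? (PySem.Dict.ofList Dic) (String.ofList (mystr.toList.drop i)) = none →
      ¬ ((mystr.toList.drop i).isPrefixOf p.toList ∧ (mystr.toList.drop i).length < p.toList.length))
instance (mystr : String) (paths : List String) (Dic : List (String × Bool)) : Decidable (Pre_Dp mystr paths Dic) := by unfold Pre_Dp; infer_instance

def pvWitness_Dp : String × List String × (List (String × Bool)) := ("ab", ["a", "b"], [])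

def Spec_Dp (mystr : String) (paths : List String) (Dic : List (String × Bool)) (out : Bool) : Prop := out = Dp_alt mystr paths Dic
instance (mystr : String) (paths : List String) (Dic : List (String × Bool)) (out : Bool) : Decidable (Spec_Dp mystr paths Dic out) := by unfold Spec_Dp; infer_instance

-- ===== CLAIM (what is proved, stated in full; the proofs are below) =====
def Claim_equal_Dp : Prop := ∀ (mystr : String) (paths : List String) (Dic : List (String × Bool)), Dom_Dp mystr paths Dic → Pre_Dp mystr paths Dic → Spec_Dp mystr paths Dic (Dp mystr paths Dic)

-- ===== LEMMAS AND PROOFS =====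

-- the common value function: fuel-indexed evaluation of the memo recurrence relative to the
-- ORIGINAL dictionary d (a lookup hit wins; "" is decomposable; else some path is a prefix
-- whose removal leaves a decomposable suffix)
def specVF (d : PySem.Dict String Bool) (ps : List (List Char)) : Nat → List Char → Bool
  | 0, _ => false
  | f + 1, s =>
    match PySem.Dict.get? d (String.ofList s) with
    | some v => v
    | none =>
      if s = [] then true
      else ps.any (fun p =>
        if p.length = 0 then false
        else (s.take p.length == p) && specVF d ps f (s.drop p.length))

lemma anyCongrMem {α : Type} (l : List α) (f g : α → Bool) (h : ∀ x ∈ l, f x = g x) :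
    l.any f = l.any g := by
  induction l with
  | nil => rfl
  | cons a t ih => simp only [List.any_cons]; rw [h a (by simp), ih (fun x hx => h x (by simp [hx]))]

lemma specVF_congr (d : PySem.Dict String Bool) (ps : List (List Char)) :
    ∀ f f' s, s.length < f → s.length < f' → specVF d ps f s = specVF d ps f' s := by
  intro f
  induction f with
  | zero => intro f' s h; omega
  | succ f ih =>
    intro f' s hf hf'
    cases f' with
    | zero => omega
    | succ f' =>
      simp only [specVF]
      cases PySem.Dict.get? d (String.ofList s) with
      | some v => rfl
      | none =>
        by_cases hs : s = []
        · simp [hs]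
        · simp only [hs, if_false]
          refine anyCongrMem _ _ _ (fun p _ => ?_)
          by_cases hp : p.length = 0
          · simp [hp]
          · simp only [hp, if_false]
            have hlen : (s.drop p.length).length = s.length - p.length := by simp
            have hspos : 0 < s.length := List.length_pos_iff.mpr hs
            rw [ih f' (s.drop p.length) (by omega) (by omega)]

-- the value of a suffix, with enough fuel for every suffix of s0
def Vv (d : PySem.Dict String Bool) (ps : List (List Char)) (s0 : List Char) (j : Nat) : Bool :=
  specVF d ps (s0.length + 1) (s0.drop j)

-- Pre_, restated on the list side with an unbounded index (d0 is the original dictionary)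
def PreL (d0 : PySem.Dict String Bool) (s0 : List Char) (ps : List (List Char)) : Prop :=
  (∀ p ∈ ps, p ≠ []) ∧
  (∀ p ∈ ps, ∀ i : Nat, s0.drop i ≠ [] →
      PySem.Dict.get? d0 (String.ofList (s0.drop i)) = none →
      ¬ (s0.drop i <+: p ∧ (s0.drop i).length < p.length))

-- check(str, path) computed as a prefix test, valid when Python would not raise
lemma checkA_eq : ∀ (p s : List Char), ¬ (s <+: p ∧ s.length < p.length) →
    checkA s p = (s.take p.length == p) := by
  intro p
  induction p with
  | nil => intro s _; simp [checkA]
  | cons c p' ih =>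
    intro s h
    cases s with
    | nil => exact absurd ⟨List.nil_prefix, by simp⟩ h
    | cons a s' =>
      by_cases hac : c = a
      · subst hac
        have h' : ¬ (s' <+: p' ∧ s'.length < p'.length) := by
          intro ⟨hpre, hlt⟩
          exact h ⟨List.cons_prefix_cons.mpr ⟨rfl, hpre⟩, by simpa using hlt⟩
        simp only [checkA]
        rw [if_neg (by simp)]
        rw [ih s' h']
        simp [List.take_succ_cons, List.cons_beq_cons]
      · simp [checkA, hac, List.take_succ_cons, Ne.symm hac]

lemma mk_inj {s t : List Char} (h : String.ofList s = String.ofList t) : s = t := by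
  have := congrArg String.toList h
  simpa using this

-- the memo-dictionary invariant: every entry for a suffix of s0 carries its Vv value, and keys
-- absent from d are absent from the original d0
def InvD (d0 d : PySem.Dict String Bool) (ps : List (List Char)) (s0 : List Char) : Prop :=
  ∀ j : Nat,
    (∀ v, PySem.Dict.get? d (String.ofList (s0.drop j)) = some v → v = Vv d0 ps s0 j) ∧
    (PySem.Dict.get? d (String.ofList (s0.drop j)) = none →
      PySem.Dict.get? d0 (String.ofList (s0.drop j)) = none)

lemma invD_insert (d0 d : PySem.Dict String Bool) (ps : List (List Char)) (s0 : List Char)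
    (i : Nat) (b : Bool) (hinv : InvD d0 d ps s0) (hb : Vv d0 ps s0 i = b) :
    InvD d0 (PySem.Dict.insert d (String.ofList (s0.drop i)) b) ps s0 := by
  intro j
  by_cases hk : String.ofList (s0.drop j) = String.ofList (s0.drop i)
  · constructor
    · intro v hget
      rw [hk, PySem.Dict.get?_insert_self] at hget
      have hdj : s0.drop j = s0.drop i := mk_inj hk
      simp only [Vv, hdj]
      rw [show specVF d0 ps (s0.length + 1) (s0.drop i) = Vv d0 ps s0 i from rfl, hb]
      exact (Option.some.inj hget).symm
    · intro hget
      rw [hk, PySem.Dict.get?_insert_self] at hget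
      exact absurd hget (by simp)
  · constructor
    · intro v hget
      rw [PySem.Dict.get?_insert_of_ne _ _ hk] at hget
      exact (hinv j).1 v hget
    · intro hget
      rw [PySem.Dict.get?_insert_of_ne _ _ hk] at hget
      exact (hinv j).2 hget

lemma drop_drop' (s0 : List Char) (i m : Nat) : (s0.drop i).drop m = s0.drop (i + m) := by
  rw [List.drop_drop]

-- one unfolding of Vv at a nonempty suffix that misses the original dictionary
lemma Vv_step (d0 : PySem.Dict String Bool) (ps : List (List Char)) (s0 : List Char) (i : Nat)
    (hpre : PreL d0 s0 ps) (hne : s0.drop i ≠ [])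
    (hget : PySem.Dict.get? d0 (String.ofList (s0.drop i)) = none) :
    Vv d0 ps s0 i
      = ps.any (fun p => ((s0.drop i).take p.length == p) && Vv d0 ps s0 (i + p.length)) := by
  have hlen : (s0.drop i).length = s0.length - i := by simp
  have hpos : 0 < (s0.drop i).length := List.length_pos_iff.mpr hne
  unfold Vv
  simp only [specVF, hget, hne, if_false]
  refine anyCongrMem _ _ _ (fun p hp => ?_)
  have hpne : p ≠ [] := hpre.1 p hp
  have hplen : p.length ≠ 0 := by simpa using hpne
  simp only [hplen, if_false]
  congr 1
  rw [drop_drop' s0 i p.length]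
  exact specVF_congr d0 ps s0.length (s0.length + 1) (s0.drop (i + p.length))
    (by simp only [List.length_drop]; omega) (by simp only [List.length_drop]; omega)

-- the main invariant lemma for port A
lemma DpA_main (s0 : List Char) (ps : List (List Char)) (d0 : PySem.Dict String Bool)
    (hpre : PreL d0 s0 ps) :
    ∀ fuel i d, InvD d0 d ps s0 → (s0.drop i).length < fuel →
      (DpA fuel (s0.drop i) ps d).1 = Vv d0 ps s0 i ∧
        InvD d0 (DpA fuel (s0.drop i) ps d).2 ps s0 := by
  intro fuel
  induction fuel with
  | zero => intro i d _ h; omega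
  | succ fuel ih =>
    intro i d hinv hlen
    simp only [DpA]
    cases hget : PySem.Dict.get? d (String.ofList (s0.drop i)) with
    | some v =>
      exact ⟨(hinv i).1 v hget, hinv⟩
    | none =>
      have hd0 := (hinv i).2 hget
      by_cases hs : s0.drop i = []
      · simp only [hs, if_true]
        constructor
        · unfold Vv
          rw [hs] at hd0 ⊢
          simp [specVF, hd0]
        · exact hinv
      · simp only [hs, if_false]
        -- the loop over paths
        have loop : ∀ rem, (∀ p ∈ rem, p ∈ ps) → ∀ d', InvD d0 d' ps s0 →
            (DpALoop (fun s' dd => DpA fuel s' ps dd) (s0.drop i) rem d').1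
              = rem.any (fun p => ((s0.drop i).take p.length == p) && Vv d0 ps s0 (i + p.length)) ∧
            InvD d0 (DpALoop (fun s' dd => DpA fuel s' ps dd) (s0.drop i) rem d').2 ps s0 := by
          intro rem
          induction rem with
          | nil => intro _ d' hinv'; exact ⟨rfl, hinv'⟩
          | cons p rest ihrem =>
            intro hsub d' hinv'
            have hps : p ∈ ps := hsub p (by simp)
            have hpne : p ≠ [] := hpre.1 p hps
            have hppos : 0 < p.length := List.length_pos_iff.mpr hpne
            have hcheck : checkA (s0.drop i) p = ((s0.drop i).take p.length == p) :=
              checkA_eq p (s0.drop i) (hpre.2 p hps i hs hd0)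
            have hrest : ∀ dd, InvD d0 dd ps s0 →
                (DpALoop (fun s' dd' => DpA fuel s' ps dd') (s0.drop i) rest dd).1
                  = rest.any (fun q => ((s0.drop i).take q.length == q) && Vv d0 ps s0 (i + q.length)) ∧
                InvD d0 (DpALoop (fun s' dd' => DpA fuel s' ps dd') (s0.drop i) rest dd).2 ps s0 :=
              fun dd h => ihrem (fun q hq => hsub q (by simp [hq])) dd h
            by_cases hc : (s0.drop i).take p.length = p
            · have hdel : deleteA (s0.drop i) p = s0.drop (i + p.length) := by
                simp only [deleteA, PySem.List.slice_from_natCast]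
                exact drop_drop' s0 i p.length
              have hlt : (s0.drop (i + p.length)).length < fuel := by
                have h1 : (s0.drop i).length = s0.length - i := by simp
                have h2 : (s0.drop (i + p.length)).length = s0.length - (i + p.length) := by simp
                have h3 : 0 < (s0.drop i).length := List.length_pos_iff.mpr hs
                omega
              obtain ⟨hb, hinv2⟩ := ih (i + p.length) d' hinv' hlt
              simp only [DpALoop, hcheck, hc, beq_self_eq_true, if_true, hdel]
              cases hres : DpA fuel (s0.drop (i + p.length)) ps d' with
              | mk b1 d1 =>
                rw [hres] at hb hinv2
                simp only at hb hinv2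
                cases b1 with
                | true =>
                  refine ⟨?_, hinv2⟩
                  simp [List.any_cons, hc, ← hb]
                | false =>
                  obtain ⟨hb2, hinv3⟩ := hrest d1 hinv2
                  refine ⟨?_, hinv3⟩
                  simp only [List.any_cons, hc, beq_self_eq_true, Bool.true_and, ← hb,
                    Bool.false_or]
                  exact hb2
            · have hcf : ((s0.drop i).take p.length == p) = false := by
                simpa using hc
              simp only [DpALoop, hcheck, hcf, if_false]
              obtain ⟨hb2, hinv3⟩ := hrest d' hinv'
              simp only [List.any_cons, hcf, Bool.false_and, Bool.false_or]
              exact ⟨hb2, hinv3⟩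
        have hVv : Vv d0 ps s0 i
            = ps.any (fun p => ((s0.drop i).take p.length == p) && Vv d0 ps s0 (i + p.length)) :=
          Vv_step d0 ps s0 i hpre hs hd0
        obtain ⟨hb, hinv'⟩ := loop ps (fun _ h => h) d hinv
        cases hres : DpALoop (fun s' dd => DpA fuel s' ps dd) (s0.drop i) ps d with
        | mk b d' =>
          rw [hres] at hb hinv'
          simp only at hb hinv'
          cases b with
          | true =>
            refine ⟨by rw [hVv, ← hb], invD_insert d0 d' ps s0 i true hinv' (by rw [hVv, ← hb])⟩
          | false =>
            refine ⟨by rw [hVv, ← hb], invD_insert d0 d' ps s0 i false hinv' (by rw [hVv, ← hb])⟩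

-- the dp table of port B holds exactly the Vv values
lemma dpRowB_spec (s0 : List Char) (ps : List (List Char)) (d0 : PySem.Dict String Bool)
    (hpre : PreL d0 s0 ps) :
    ∀ k, k ≤ s0.length + 1 → (dpRowB s0 ps d0 k).length = k ∧
      ∀ j, j < k → (dpRowB s0 ps d0 k)[j]? = some (Vv d0 ps s0 (s0.length + 1 - k + j)) := by
  intro k
  induction k with
  | zero => intro _; exact ⟨rfl, by omega⟩
  | succ k ihk =>
    intro hk
    obtain ⟨hlen, hval⟩ := ihk (by omega)
    have hi : s0.length + 1 - (k + 1) = s0.length - k := by omega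
    have hsuf : PySem.List.slice s0 (some ((s0.length - k : Nat) : Int)) none
        = s0.drop (s0.length - k) := PySem.List.slice_from_natCast s0 (s0.length - k)
    constructor
    · simp only [dpRowB, List.length_cons, hlen]
    · intro j hj
      cases j with
      | zero =>
        simp only [dpRowB, hsuf, List.getElem?_cons_zero, Option.some.injEq, hi, Nat.add_zero]
        cases hget : PySem.Dict.get? d0 (String.ofList (s0.drop (s0.length - k))) with
        | some b => unfold Vv; simp [specVF, hget]
        | none =>
          by_cases hk0 : k = 0
          · subst hk0
            have hdrop : s0.drop (s0.length - 0) = [] := by simp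
            unfold Vv
            rw [hdrop] at hget ⊢
            simp [specVF, hget]
          · have hkle : k ≤ s0.length := by omega
            have hne : s0.drop (s0.length - k) ≠ [] := by
              intro hnil
              have := List.drop_eq_nil_iff.mp hnil
              omega
            rw [Vv_step d0 ps s0 (s0.length - k) hpre hne hget]
            simp only [hk0, if_false]
            refine anyCongrMem _ _ _ (fun p hp => ?_)
            have hpne : p ≠ [] := hpre.1 p hp
            have hppos : 0 < p.length := List.length_pos_iff.mpr hpne
            have hslice : PySem.List.slice s0 (some ((s0.length - k : Nat) : Int))
                (some (((s0.length - k : Nat) : Int) + (p.length : Int)))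
                = (s0.drop (s0.length - k)).take p.length :=
              PySem.List.slice_natCast_add s0 (s0.length - k) p.length
            rw [hslice]
            by_cases hc : (s0.drop (s0.length - k)).take p.length = p
            · have hlentake := congrArg List.length hc
              have hple : p.length ≤ (s0.drop (s0.length - k)).length := by
                simp only [List.length_take] at hlentake
                omega
              have hdlen : (s0.drop (s0.length - k)).length = k := by simp; omega
              have hgd : (false :: dpRowB s0 ps d0 k).getD p.length false
                  = Vv d0 ps s0 (s0.length - k + p.length) := by
                obtain ⟨m, hm⟩ : ∃ m, p.length = m + 1 := ⟨p.length - 1, by omega⟩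
                rw [hm, List.getD_eq_getElem?_getD, List.getElem?_cons_succ,
                  hval m (by omega)]
                simp only [Option.getD_some]
                congr 1
                omega
              rw [hgd]
            · have hcf : ((s0.drop (s0.length - k)).take p.length == p) = false := by
                simpa using hc
              simp [hcf]
      | succ j =>
        simp only [dpRowB, List.getElem?_cons_succ]
        rw [hval j (by omega)]
        congr 2
        omega

-- ===== VERDICT (by name: the statement is the Claim_ definition above) =====
theorem Dp_spec : Claim_equal_Dp := by
  intro mystr paths Dic _ hpre
  unfold Spec_Dp Dp Dp_alt
  set s0 := mystr.toList with hs0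
  set ps := paths.map String.toList with hps
  set d0 := PySem.Dict.ofList Dic with hd0
  cases hget0 : PySem.Dict.get? d0 (String.ofList s0) with
  | some v =>
    -- both ports read the memo entry for the whole string
    have hA : (DpA (s0.length + 1) s0 ps d0).1 = v := by
      simp [DpA, hget0]
    have hB : (dpRowB s0 ps d0 (s0.length + 1)).headD false = v := by
      simp [dpRowB, Nat.sub_self, PySem.List.slice_zero_start, PySem.List.slice_none_none,
        hget0, List.headD_cons]
    rw [hA, hB]
  | none =>
    by_cases hs0nil : s0 = []
    · -- the empty string: both ports return true
      rw [hs0nil] at hget0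
      have hA : (DpA (s0.length + 1) s0 ps d0).1 = true := by
        simp [DpA, hs0nil, hget0]
      have hB : (dpRowB s0 ps d0 (s0.length + 1)).headD false = true := by
        simp [dpRowB, hs0nil, PySem.List.slice_zero_start, PySem.List.slice_none_none,
          hget0, List.headD_cons]
      rw [hA, hB]
    · -- the main case: no path is empty, and the invariant machinery applies
      have hnoemp : ∀ p ∈ ps, p ≠ [] := by
        intro p hp hl
        obtain ⟨q, hq, rfl⟩ := List.mem_map.mp hp
        have hq0 : q = "" := by
          have h2 := congrArg String.ofList hl
          simpa [String.ofList_toList] using h2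
        subst hq0
        rcases hpre.1 hq with h1 | h2
        · exact hs0nil h1
        · exact h2 hget0
      have hpreL : PreL d0 s0 ps := by
        refine ⟨hnoemp, ?_⟩
        intro p hp i hne hnone hcon
        obtain ⟨q, hq, rfl⟩ := List.mem_map.mp hp
        have hi : i < s0.length := by
          by_contra hge
          exact hne (List.drop_eq_nil_iff.mpr (by omega))
        exact hpre.2 q hq i (List.mem_range.mpr hi) hnone
          ⟨List.isPrefixOf_iff_prefix.mpr hcon.1, hcon.2⟩
      have hinv0 : InvD d0 d0 ps s0 := by
        intro j
        refine ⟨fun v hget => ?_, fun h => h⟩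
        unfold Vv
        cases hf : s0.length + 1 with
        | zero => omega
        | succ f => simp [specVF, hget]
      have hmain := DpA_main s0 ps d0 hpreL (s0.length + 1) 0 d0 hinv0 (by simp)
      rw [List.drop_zero] at hmain
      rw [hmain.1]
      obtain ⟨hlen, hval⟩ := dpRowB_spec s0 ps d0 hpreL (s0.length + 1) (le_refl _)
      have h0 := hval 0 (by omega)
      cases hrow : dpRowB s0 ps d0 (s0.length + 1) with
      | nil => rw [hrow] at h0; simp at h0
      | cons a t =>
        rw [hrow] at h0
        simp only [List.getElem?_cons_zero, Option.some.injEq] at h0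
        simp only [List.headD_cons]
        rw [h0]
        congr 1
        omega
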